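-- pv_equiv track=rewrite | github.com/patrickbryan/Google-Code-Jam | Google-APAC-2016-University-Graduates-Test/Round1A-ProblemA.py | googolChar
-- ===== SOURCE A (Python) =====
-- def googolChar(cP, revs):
--     ans = ''
--     if (isPowTwoOrOneOff(cP)):
--         if (cP % 2 == 0 or cP == 1):
--             ans = '0'
--         else:
--             ans = '1'
--         if (revs % 2 == 1):
--             if (ans == '0'):
--                 ans = '1'
--             else:
--                 ans = '0'
--     else:
--         powDif = abs(largestPowerOf2(cP) - cP) * 2;
--         ans = googolChar(cP - powDif, revs + 1);
--
--     return ans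
--
-- def isPowTwoOrOneOff(x):
--     ans = (x != 0) and ((x & (x - 1)) == 0)
--
--     if not ans:
--         x += 1
--         ans = (x != 0) and ((x & (x - 1)) == 0)
--     return ans
--
-- def largestPowerOf2(n):
--     return 2**(n.bit_length() - 1)
-- ===== SOURCE B (Python) =====
-- def googolChar(cP, revs):
--     # closed form: the googol string is the regular paperfolding (dragon) sequence.
--     # Strip trailing zero bits; the bit is 0 iff the remaining odd part is 1 mod 4
--     # (position 0 also yields 0); an odd number of reversals flips the bit.
--     k = cP
--     while k != 0 and k % 2 == 0:
--         k //= 2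
--     bit = 0 if (k == 0 or k % 4 == 1) else 1
--     if revs % 2 == 1:
--         bit = 1 - bit
--     return str(bit)
-- ===== Notes on version B (the rewrite author's own statement) =====
-- stated objective: alternative
-- what changed: Replaces A's bit-twiddling recursion (reflect cP across the largest power of two until a power-of-two-or-one-off base case, flipping on odd depth) with the closed-form paperfolding rule: strip trailing zero bits of cP and test the odd part mod 4, flipping once when revs is odd.
import Mathlib
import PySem

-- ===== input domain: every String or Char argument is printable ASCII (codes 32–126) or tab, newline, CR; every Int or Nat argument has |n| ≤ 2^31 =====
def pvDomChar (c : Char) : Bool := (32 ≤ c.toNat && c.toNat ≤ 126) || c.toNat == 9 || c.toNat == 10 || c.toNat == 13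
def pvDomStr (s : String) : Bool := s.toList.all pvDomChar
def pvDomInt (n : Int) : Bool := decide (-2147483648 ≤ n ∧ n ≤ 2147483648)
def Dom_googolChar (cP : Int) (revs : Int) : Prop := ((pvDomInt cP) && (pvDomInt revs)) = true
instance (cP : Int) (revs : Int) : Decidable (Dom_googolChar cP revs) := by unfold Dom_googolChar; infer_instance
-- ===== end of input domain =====

-- B replaces A's reflect-to-the-largest-power-of-two recursion by the closed-form
-- paperfolding rule: strip trailing zero bits, test the odd part mod 4, flip on odd revs.
-- Pre_ excludes cP < 0, where A recurses forever (Python raises RecursionError).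


-- ===== PORT A =====
def isPowTwoOrOneOff (x : Int) : Bool :=
  let ans := decide (x ≠ 0) && decide (PySem.Int.band x (x - 1) = 0)
  if !ans then
    let x := x + 1
    decide (x ≠ 0) && decide (PySem.Int.band x (x - 1) = 0)
  else ans

def largestPowerOf2 (n : Int) : Int := 2 ^ (PySem.Int.bitLength n - 1)

-- fuel makes the recursion total; cP.toNat + 1 steps suffice since cP strictly
-- decreases and stays nonnegative on every input Pre_ admits
def googolCharGo : Nat → Int → Int → String
  | 0, _, _ => ""
  | fuel + 1, cP, revs =>
    if isPowTwoOrOneOff cP then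
      let ans := if PySem.Int.mod cP 2 = 0 ∨ cP = 1 then "0" else "1"
      if PySem.Int.mod revs 2 = 1 then (if ans = "0" then "1" else "0") else ans
    else
      let powDif := |largestPowerOf2 cP - cP| * 2
      googolCharGo fuel (cP - powDif) (revs + 1)

def googolChar (cP : Int) (revs : Int) : String := googolCharGo (cP.toNat + 1) cP revs

-- ===== PORT B =====
-- fuel makes the while loop total; each pass halves |k|, so |cP| + 1 passes suffice
def stripGo : Nat → Int → Int
  | 0, k => k
  | fuel + 1, k =>
    if k ≠ 0 ∧ PySem.Int.mod k 2 = 0 then stripGo fuel (PySem.Int.floordiv k 2) else k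

def googolChar_alt (cP : Int) (revs : Int) : String :=
  let k := stripGo (cP.natAbs + 1) cP
  let bit : Int := if k = 0 ∨ PySem.Int.mod k 4 = 1 then 0 else 1
  let bit := if PySem.Int.mod revs 2 = 1 then 1 - bit else bit
  PySem.Int.toStr bit

-- ===== PRECONDITION & SPEC =====
-- Pre_ excludes exactly cP < 0: there A's recursion never reaches a base case and
-- Python raises RecursionError.
def Pre_googolChar (cP : Int) (revs : Int) : Prop := 0 ≤ cP
instance (cP : Int) (revs : Int) : Decidable (Pre_googolChar cP revs) := by unfold Pre_googolChar; infer_instance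
def pvWitness_googolChar : Int × Int := (6, 3)

def Spec_googolChar (cP : Int) (revs : Int) (out : String) : Prop := out = googolChar_alt cP revs
instance (cP : Int) (revs : Int) (out : String) : Decidable (Spec_googolChar cP revs out) := by unfold Spec_googolChar; infer_instance

-- ===== CLAIM (what is proved, stated in full; the proofs are below) =====
def Claim_equal_googolChar : Prop := ∀ (cP : Int) (revs : Int), Dom_googolChar cP revs → Pre_googolChar cP revs → Spec_googolChar cP revs (googolChar cP revs)

-- ===== LEMMAS AND PROOFS =====

-- Nat-level model of B's stripping loop
def stripN (k : Nat) : Nat :=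
  if h : k ≠ 0 ∧ k % 2 = 0 then stripN (k / 2) else k
  termination_by k
  decreasing_by exact Nat.div_lt_self (Nat.pos_of_ne_zero h.1) (by omega)

-- Nat-level model of B's bit (before the revs flip)
def pfb (k : Nat) : Nat := if stripN k = 0 ∨ stripN k % 4 = 1 then 0 else 1

theorem mod_succ_two (a : Int) : PySem.Int.mod (a + 1) 2 = 1 - PySem.Int.mod a 2 := by
  simp [PySem.Int.mod, Int.fmod_eq_emod]; omega

theorem stripN_zero : stripN 0 = 0 := by unfold stripN; simp
theorem stripN_odd (k : Nat) (h : k % 2 = 1) : stripN k = k := by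
  unfold stripN; simp [h]
theorem stripN_even (k : Nat) (h0 : k ≠ 0) (h : k % 2 = 0) : stripN k = stripN (k / 2) := by
  rw [stripN]; simp [h0, h]
theorem stripN_two_pow (k : Nat) : stripN (2 ^ k) = 1 := by
  induction k with
  | zero => unfold stripN; simp
  | succ k ih =>
    rw [stripN_even (2 ^ (k+1)) (by positivity) (by simp [Nat.pow_succ])]
    simpa [Nat.pow_succ, Nat.mul_div_cancel] using ih

theorem mod_two_natCast (n : Nat) : PySem.Int.mod (n : Int) 2 = ((n % 2 : Nat) : Int) := by
  exact_mod_cast PySem.Int.mod_natCast n 2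

theorem mod_four_natCast (n : Nat) : PySem.Int.mod (n : Int) 4 = ((n % 4 : Nat) : Int) := by
  exact_mod_cast PySem.Int.mod_natCast n 4

theorem floordiv_two_natCast (n : Nat) : PySem.Int.floordiv (n : Int) 2 = ((n / 2 : Nat) : Int) := by
  exact_mod_cast PySem.Int.floordiv_natCast n 2

theorem stripGo_eq (f : Nat) (n : Nat) (h : n < f) : stripGo f (n : Int) = (stripN n : Int) := by
  induction f generalizing n with
  | zero => omega
  | succ f ih =>
    rw [stripGo]
    by_cases h0 : n = 0
    · subst h0; simp [stripN_zero]
    · by_cases h2 : n % 2 = 0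
      · rw [if_pos ⟨by exact_mod_cast h0, by rw [mod_two_natCast, h2]; rfl⟩,
          floordiv_two_natCast]
        have hd : n / 2 < n := Nat.div_lt_self (Nat.pos_of_ne_zero h0) (by omega)
        rw [ih (n / 2) (by omega), stripN_even n h0 h2]
      · rw [if_neg (by rintro ⟨-, hm⟩; rw [mod_two_natCast] at hm; omega),
          stripN_odd n (by omega)]

theorem alt_eq (n : Nat) (revs : Int) :
    googolChar_alt (n : Int) revs =
      PySem.Int.toStr (if PySem.Int.mod revs 2 = 1 then 1 - (pfb n : Int) else (pfb n : Int)) := by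
  simp only [googolChar_alt]
  rw [Int.natAbs_natCast, stripGo_eq (n + 1) n (by omega)]
  have hbit : (if ((stripN n : Int) = 0 ∨ PySem.Int.mod (stripN n : Int) 4 = 1) then (0 : Int) else 1)
      = (pfb n : Int) := by
    unfold pfb
    rw [mod_four_natCast]
    by_cases hc : stripN n = 0 ∨ stripN n % 4 = 1
    · rw [if_pos (by omega), if_pos hc]; simp
    · rw [if_neg (by omega), if_neg hc]; simp
  rw [hbit]


theorem pfb_le_one (k : Nat) : pfb k ≤ 1 := by unfold pfb; split <;> omega

theorem pfb_even (k : Nat) (h0 : k ≠ 0) (h : k % 2 = 0) : pfb k = pfb (k / 2) := by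
  unfold pfb; rw [stripN_even k h0 h]

theorem pfb_reflect (m x : Nat) (hm : 2 ≤ m) (hx : 0 < x) (hx2 : x < 2 ^ (m - 1)) :
    pfb (2 ^ m - x) = 1 - pfb x := by
  induction x using Nat.strong_induction_on generalizing m with
  | _ x ih =>
    have hpow : 2 ^ m = 2 * 2 ^ (m - 1) := by
      rw [← Nat.pow_succ']; congr 1; omega
    rcases Nat.even_or_odd x with ⟨y, hy⟩ | ⟨y, hy⟩
    · -- even: halve both sides and recurse
      have hy0 : 0 < y := by omega
      have hm3 : 3 ≤ m := by
        by_contra hc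
        have hm2 : m = 2 := by omega
        rw [hm2] at hx2; omega
      have hpow1 : 2 ^ (m - 1) = 2 * 2 ^ (m - 2) := by
        rw [← Nat.pow_succ']; congr 1; omega
      have e1 : pfb (2 ^ m - x) = pfb (2 ^ (m - 1) - y) := by
        rw [pfb_even (2 ^ m - x) (by omega) (by omega)]
        congr 1; omega
      have e2 : pfb x = pfb y := by
        rw [pfb_even x (by omega) (by omega)]; congr 1; omega
      rw [e1, e2]
      exact ih y (by omega) (m - 1) (by omega) hy0 (by rw [show m - 1 - 1 = m - 2 by omega]; omega)
    · -- odd: both sides are their own odd parts; compare mod 4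
      have hdvd : (4 : Nat) ∣ 2 ^ m := by
        have h22 : (2 : Nat) ^ 2 ∣ 2 ^ m := Nat.pow_dvd_pow 2 hm
        simpa using h22
      have hxlt : x < 2 ^ m := by omega
      obtain ⟨q, hq⟩ := hdvd
      rw [hq]
      rw [hq] at hxlt
      have hxo : x % 2 = 1 := by omega
      have hro : (4 * q - x) % 2 = 1 := by omega
      unfold pfb
      rw [stripN_odd x hxo, stripN_odd (4 * q - x) hro]
      by_cases hc : x % 4 = 1
      · have hneg : ¬(4 * q - x = 0 ∨ (4 * q - x) % 4 = 1) := by omega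
        rw [if_pos (Or.inr hc), if_neg hneg]
      · have hneg : ¬(x = 0 ∨ x % 4 = 1) := by omega
        have hpos : (4 * q - x) % 4 = 1 := by omega
        rw [if_neg hneg, if_pos (Or.inr hpos)]

-- Nat bit-twiddling facts behind A's power-of-two test
theorem land_two_mul_pred (m : Nat) (hm : 0 < m) : (2 * m) &&& (2 * m - 1) = 2 * (m &&& (m - 1)) := by
  have h1 : 2 * m = Nat.bit false m := by simp [Nat.bit]
  have h2 : 2 * m - 1 = Nat.bit true (m - 1) := by simp [Nat.bit]; omega
  rw [h2, h1, Nat.land_bit]; simp [Nat.bit]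
theorem land_succ_self (m : Nat) : (2 * m + 1) &&& (2 * m) = 2 * m := by
  have h1 : 2 * m + 1 = Nat.bit true m := by simp [Nat.bit]
  have h2 : 2 * m = Nat.bit false m := by simp [Nat.bit]
  rw [h1, h2, Nat.land_bit]; simp [Nat.bit]

theorem land_pred_eq_zero_iff (n : Nat) (h : 0 < n) : n &&& (n - 1) = 0 ↔ ∃ k, n = 2 ^ k := by
  induction n using Nat.strong_induction_on with
  | _ n ih =>
    rcases Nat.even_or_odd n with ⟨m, hm⟩ | ⟨m, hm⟩
    · -- n = 2 * m, m > 0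
      have hm0 : 0 < m := by omega
      rw [show n = 2 * m by omega, land_two_mul_pred m hm0]
      constructor
      · intro h0
        obtain ⟨k, hk⟩ := (ih m (by omega) hm0).1 (by omega)
        exact ⟨k + 1, by rw [hk]; ring⟩
      · rintro ⟨k, hk⟩
        rcases k with _ | k
        · omega
        · have hmk : m = 2 ^ k := by
            have : 2 * m = 2 * 2 ^ k := by rw [← pow_succ']; omega
            omega
          have := (ih m (by omega) hm0).2 ⟨k, hmk⟩
          omega
    · -- n = 2 * m + 1, odd
      rcases Nat.eq_or_lt_of_le (show 1 ≤ n by omega) with h1 | h1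
      · rw [← h1]; simp
        exact ⟨0, rfl⟩
      · rw [show n = 2 * m + 1 by omega, show 2 * m + 1 - 1 = 2 * m by omega, land_succ_self]
        constructor
        · intro h0; omega
        · rintro ⟨k, hk⟩
          rcases k with _ | k
          · omega
          · have : 2 * m + 1 = 2 * 2 ^ k := by rw [← pow_succ']; omega
            omega

theorem isPow_iff (n : Nat) :
    isPowTwoOrOneOff (n : Int) = true ↔ (∃ k, n = 2 ^ k) ∨ (∃ k, n + 1 = 2 ^ k) := by
  rcases Nat.eq_zero_or_pos n with h0 | h0
  · subst h0
    constructor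
    · intro _; exact Or.inr ⟨0, rfl⟩
    · intro _; decide
  · have hb1 : PySem.Int.band (n : Int) ((n : Int) - 1) = ((n &&& (n - 1) : Nat) : Int) := by
      rw [show ((n : Int) - 1) = ((n - 1 : Nat) : Int) by omega, PySem.Int.band_natCast]
    have hb2 : PySem.Int.band ((n : Int) + 1) ((n : Int) + 1 - 1) = (((n + 1) &&& n : Nat) : Int) := by
      rw [show ((n : Int) + 1 - 1) = (n : Int) by ring,
        show ((n : Int) + 1) = ((n + 1 : Nat) : Int) by push_cast; ring, PySem.Int.band_natCast]
    unfold isPowTwoOrOneOff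
    by_cases hp : n &&& (n - 1) = 0
    · have : (decide ((n : Int) ≠ 0) && decide (PySem.Int.band (n : Int) ((n : Int) - 1) = 0)) = true := by
        rw [hb1, hp]
        simp; omega
      rw [this]
      simp only [Bool.not_true, Bool.false_eq_true, if_false]
      constructor
      · intro _; exact Or.inl ((land_pred_eq_zero_iff n h0).1 hp)
      · intro _; trivial
    · have hdec : (decide ((n : Int) ≠ 0) && decide (PySem.Int.band (n : Int) ((n : Int) - 1) = 0)) = false := by
        simp [hb1]
        intro _; exact_mod_cast hp
      rw [hdec]
      simp only [Bool.not_false, if_true]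
      rw [hb2]
      have hiff := land_pred_eq_zero_iff (n + 1) (by omega)
      rw [show n + 1 - 1 = n by omega] at hiff
      constructor
      · intro hdd
        simp at hdd
        exact Or.inr (hiff.1 (by exact_mod_cast hdd.2))
      · rintro (⟨k, hk⟩ | hpp)
        · exact absurd ((land_pred_eq_zero_iff n h0).2 ⟨k, hk⟩) hp
        · have := hiff.2 hpp
          simp [this]
          omega

theorem pfb_zero : pfb 0 = 0 := by unfold pfb; rw [stripN_zero]; simp
theorem pfb_two_pow (k : Nat) : pfb (2 ^ k) = 0 := by
  unfold pfb; rw [stripN_two_pow]; norm_num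
theorem pfb_pow_sub_one (k : Nat) (hk : 2 ≤ k) : pfb (2 ^ k - 1) = 1 := by
  have hdvd : (4 : Nat) ∣ 2 ^ k := by
    have h22 : (2 : Nat) ^ 2 ∣ 2 ^ k := Nat.pow_dvd_pow 2 hk
    simpa using h22
  have h4 : 4 ≤ 2 ^ k := by
    calc (4 : Nat) = 2 ^ 2 := by norm_num
    _ ≤ 2 ^ k := Nat.pow_le_pow_right (by omega) hk
  obtain ⟨q, hq⟩ := hdvd
  rw [hq]
  have ho : (4 * q - 1) % 2 = 1 := by omega
  unfold pfb
  rw [stripN_odd (4 * q - 1) ho]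
  have hneg : ¬(4 * q - 1 = 0 ∨ (4 * q - 1) % 4 = 1) := by omega
  rw [if_neg hneg]

theorem toStr_zero : PySem.Int.toStr 0 = "0" := by decide
theorem toStr_one : PySem.Int.toStr 1 = "1" := by decide

theorem close0 (revs : Int) :
    (if PySem.Int.mod revs 2 = 1 then (if ("0" : String) = "0" then "1" else "0") else "0")
      = PySem.Int.toStr (if PySem.Int.mod revs 2 = 1 then 1 - ((0 : Nat) : Int) else ((0 : Nat) : Int)) := by
  rcases PySem.Int.mod_two_eq revs with hr | hr <;> rw [hr] <;> norm_num [toStr_zero, toStr_one]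

theorem close1 (revs : Int) :
    (if PySem.Int.mod revs 2 = 1 then (if ("1" : String) = "0" then "1" else "0") else "1")
      = PySem.Int.toStr (if PySem.Int.mod revs 2 = 1 then 1 - ((1 : Nat) : Int) else ((1 : Nat) : Int)) := by
  rcases PySem.Int.mod_two_eq revs with hr | hr <;> rw [hr] <;> norm_num [toStr_zero, toStr_one]

theorem go_eq (f : Nat) (n : Nat) (revs : Int) (h : n < f) :
    googolCharGo f (n : Int) revs = googolChar_alt (n : Int) revs := by
  induction f generalizing n revs with
  | zero => omega
  | succ f ih =>
    simp only [googolCharGo]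
    by_cases hb : isPowTwoOrOneOff (n : Int) = true
    · rw [if_pos hb, alt_eq]
      rcases (isPow_iff n).1 hb with ⟨k, hk⟩ | ⟨k, hk⟩
      · rcases k with _ | k
        · -- n = 1
          have hn : n = 1 := by simpa using hk
          subst hn
          rw [if_pos (Or.inr (by norm_num)), show pfb 1 = 0 from pfb_two_pow 0]
          exact close0 revs
        · -- n = 2 ^ (k + 1), even
          have hcond : PySem.Int.mod (n : Int) 2 = 0 := by
            rw [mod_two_natCast, hk]
            have : 2 ^ (k + 1) = 2 * 2 ^ k := by rw [← Nat.pow_succ']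
            simp [this, Nat.mul_mod_right]
          rw [if_pos (Or.inl hcond), hk, pfb_two_pow]
          exact close0 revs
      · -- n + 1 = 2 ^ k
        rcases k with _ | _ | k
        · -- n = 0
          have hn : n = 0 := by simpa using hk
          subst hn
          rw [if_pos (Or.inl (by rw [mod_two_natCast]; norm_num)), pfb_zero]
          exact close0 revs
        · -- n = 1
          have hn : n = 1 := by omega
          subst hn
          rw [if_pos (Or.inr (by norm_num)), show pfb 1 = 0 from pfb_two_pow 0]
          exact close0 revs
        · -- n = 2 ^ (k + 2) - 1, odd and ≥ 3
          have h4 : 4 ≤ 2 ^ (k + 2) := by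
            calc (4 : Nat) = 2 ^ 2 := by norm_num
            _ ≤ 2 ^ (k + 2) := Nat.pow_le_pow_right (by omega) (by omega)
          have hk2 : n + 1 = 2 ^ (k + 2) := by simpa using hk
          have hn : n = 2 ^ (k + 2) - 1 := by omega
          have hdvd : (4 : Nat) ∣ 2 ^ (k + 2) := by
            have h22 : (2 : Nat) ^ 2 ∣ 2 ^ (k + 2) := Nat.pow_dvd_pow 2 (by omega)
            simpa using h22
          have hno : n % 2 = 1 := by obtain ⟨q, hq⟩ := hdvd; omega
          have hcond : ¬(PySem.Int.mod (n : Int) 2 = 0 ∨ (n : Int) = 1) := by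
            rw [mod_two_natCast]
            push_neg
            constructor
            · rw [hno]; norm_num
            · have : n ≠ 1 := by omega
              exact_mod_cast this
          rw [if_neg hcond, hn, pfb_pow_sub_one (k + 2) (by omega)]
          exact close1 revs
    · -- recursive case: reflect across the largest power of two and recurse
      rw [if_neg hb]
      have hnn : ¬((∃ k, n = 2 ^ k) ∨ (∃ k, n + 1 = 2 ^ k)) := fun hc => hb ((isPow_iff n).2 hc)
      obtain ⟨hnp, hnp1⟩ := not_or.1 hnn
      have hn0 : n ≠ 0 := fun h0 => hnp1 ⟨0, by simp [h0]⟩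
      have hn1 : n ≠ 1 := fun h1 => hnp ⟨0, by simp [h1]⟩
      have hn2 : 2 ≤ n := by omega
      have hub : n < 2 ^ PySem.Int.bitLength (n : Int) := by
        have := PySem.Int.lt_two_pow_bitLength (n : Int)
        simpa using this
      have hlb : 2 ^ (PySem.Int.bitLength (n : Int) - 1) ≤ n := by
        have := PySem.Int.two_pow_bitLength_le (n : Int) (by exact_mod_cast hn0)
        simpa using this
      set bl := PySem.Int.bitLength (n : Int) with hbl
      have hbl2 : 2 ≤ bl := by
        by_contra hc
        have h01 : bl = 0 ∨ bl = 1 := by omega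
        rcases h01 with h0 | h0 <;> rw [h0] at hub <;> norm_num at hub <;> omega
      have hpow : 2 ^ bl = 2 * 2 ^ (bl - 1) := by rw [← Nat.pow_succ']; congr 1; omega
      have hLlt : 2 ^ (bl - 1) < n := lt_of_le_of_ne hlb (fun he => hnp ⟨bl - 1, he.symm⟩)
      have harg : (n : Int) - |largestPowerOf2 (n : Int) - (n : Int)| * 2
          = ((2 * 2 ^ (bl - 1) - n : Nat) : Int) := by
        unfold largestPowerOf2
        rw [← hbl]
        rw [show ((2 : Int) ^ (bl - 1)) = ((2 ^ (bl - 1) : Nat) : Int) by push_cast; ring]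
        rw [abs_of_nonpos (by omega : ((2 ^ (bl - 1) : Nat) : Int) - (n : Int) ≤ 0)]
        omega
      rw [harg, ih (2 * 2 ^ (bl - 1) - n) (revs + 1) (by omega), alt_eq, alt_eq]
      have hrefl := pfb_reflect bl (2 * 2 ^ (bl - 1) - n) hbl2 (by omega) (by omega)
      rw [show 2 ^ bl - (2 * 2 ^ (bl - 1) - n) = n by omega] at hrefl
      have hle := pfb_le_one (2 * 2 ^ (bl - 1) - n)
      have hle2 := pfb_le_one n
      have hZ : ((pfb (2 * 2 ^ (bl - 1) - n) : Int)) = 1 - (pfb n : Int) := by omega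
      rw [mod_succ_two, hZ]
      rcases PySem.Int.mod_two_eq revs with hr | hr <;> rw [hr] <;> norm_num <;> congr 1 <;> ring

-- ===== VERDICT (by name: the statement is the Claim_ definition above) =====
theorem googolChar_spec : Claim_equal_googolChar := by
  intro cP revs _ hpre
  unfold Spec_googolChar googolChar
  obtain ⟨n, rfl⟩ : ∃ n : Nat, cP = (n : Int) := ⟨cP.toNat, (Int.toNat_of_nonneg hpre).symm⟩
  simpa using go_eq (n + 1) n revs (by omega)
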